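-- pv_equiv track=rewrite | github.com/mvp-krayu/krayu-program-intelligence | pios/core/v0.1/engine/feedback_registry.py | compare_entities
-- ===== SOURCE A (Python) =====
-- UNDEFINED = None
--
-- ALLOWED_CLASSIFICATIONS = {"NO_CHANGE", "STATE_CHANGE", "ADDED", "REMOVED"}
--
-- STATE_FIELD = "synthesis_state"
--
-- def compare_entities(baseline_entities, current_entities):
--     """Compare baseline vs current at entity level.
--     Returns list of comparison records with classification only.
--     No scoring. No thresholds. No inference.
--     """
--     all_ids = sorted(set(baseline_entities) | set(current_entities))
--     signals = []
--
--     for entity_id in all_ids: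
--         in_baseline = entity_id in baseline_entities
--         in_current  = entity_id in current_entities
--
--         if in_baseline and in_current:
--             baseline_state = baseline_entities[entity_id]
--             current_state  = current_entities[entity_id]
--             if baseline_state == current_state:
--                 classification = "NO_CHANGE"
--             else:
--                 classification = "STATE_CHANGE"
--         elif not in_baseline and in_current:
--             baseline_state = UNDEFINED
--             current_state  = current_entities[entity_id]
--             classification = "ADDED"
--         else:  # in_baseline and not in_current
--             baseline_state = baseline_entities[entity_id]
--             current_state  = UNDEFINED
--             classification = "REMOVED"
--
--         assert classification in ALLOWED_CLASSIFICATIONS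
--
--         signals.append({
--             "entity_id":       entity_id,
--             "classification":  classification,
--             "baseline_state":  baseline_state,
--             "current_state":   current_state,
--             "state_field":     STATE_FIELD,
--             "source":          "40.8_delivery_packet",
--         })
--
--     return signals
-- ===== SOURCE B (Python) =====
-- UNDEFINED = None
-- STATE_FIELD = "synthesis_state"
--
-- def _record(entity_id, classification, baseline_state, current_state):
--     return {
--         "entity_id":      entity_id,
--         "classification": classification,
--         "baseline_state": baseline_state,
--         "current_state":  current_state,
--         "state_field":    STATE_FIELD,
--         "source":         "40.8_delivery_packet",
--     }
--
-- def compare_entities(baseline_entities, current_entities):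
--     """Two-pointer merge of the two key-sorted item lists: no sets, no union,
--     no membership tests, no dict lookups -- each record is decided by comparing
--     the two front keys, and the output comes out already in sorted order."""
--     bs = sorted(baseline_entities.items(), key=lambda kv: kv[0])
--     cs = sorted(current_entities.items(), key=lambda kv: kv[0])
--     out = []
--     i = j = 0
--     while i < len(bs) and j < len(cs):
--         (bk, bv), (ck, cv) = bs[i], cs[j]
--         if bk == ck:
--             cls = "NO_CHANGE" if bv == cv else "STATE_CHANGE"
--             out.append(_record(bk, cls, bv, cv))
--             i += 1
--             j += 1
--         elif bk < ck:
--             out.append(_record(bk, "REMOVED", bv, UNDEFINED))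
--             i += 1
--         else:
--             out.append(_record(ck, "ADDED", UNDEFINED, cv))
--             j += 1
--     for bk, bv in bs[i:]:
--         out.append(_record(bk, "REMOVED", bv, UNDEFINED))
--     for ck, cv in cs[j:]:
--         out.append(_record(ck, "ADDED", UNDEFINED, cv))
--     return out
-- ===== Notes on version B (the rewrite author's own statement) =====
-- stated objective: alternative
-- what changed: A sorts the union of the key sets and classifies each id by two membership tests plus dict lookups; B never forms a set or tests membership: it sorts the two item lists by key and runs a two-pointer merge, deciding each record by comparing the two front keys and draining the leftover tail as REMOVED/ADDED.
import Mathlib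
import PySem

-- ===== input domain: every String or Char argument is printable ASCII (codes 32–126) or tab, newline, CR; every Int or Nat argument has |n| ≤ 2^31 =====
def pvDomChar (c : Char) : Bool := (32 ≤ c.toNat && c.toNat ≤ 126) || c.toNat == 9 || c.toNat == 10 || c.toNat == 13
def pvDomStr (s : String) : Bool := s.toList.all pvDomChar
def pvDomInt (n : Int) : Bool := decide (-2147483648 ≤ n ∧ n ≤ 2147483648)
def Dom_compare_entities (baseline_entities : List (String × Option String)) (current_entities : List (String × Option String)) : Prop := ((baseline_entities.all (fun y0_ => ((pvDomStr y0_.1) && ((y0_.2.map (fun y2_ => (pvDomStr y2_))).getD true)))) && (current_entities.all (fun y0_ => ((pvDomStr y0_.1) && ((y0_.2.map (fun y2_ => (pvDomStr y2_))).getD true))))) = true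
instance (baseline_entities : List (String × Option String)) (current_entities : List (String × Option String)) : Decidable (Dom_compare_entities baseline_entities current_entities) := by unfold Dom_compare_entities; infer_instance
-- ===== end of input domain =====

-- B replaces A's membership-classified pass over sorted(union of key sets) by a two-pointer
-- merge of the two key-sorted item lists (objective: alternative algorithm, same cost).
-- Equivalence is proved under Pre_: the association lists have pairwise-distinct keys,
-- i.e. they actually encode Python dicts (the callers pass dicts).

-- ===== PORT A =====
def compare_entities (baseline_entities : List (String × Option String)) (current_entities : List (String × Option String)) : List (List (String × Option String)) :=
  let bd := PySem.Dict.mk baseline_entities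
  let cd := PySem.Dict.mk current_entities
  -- all_ids = sorted(set(baseline_entities) | set(current_entities))
  let all_ids := PySem.List.sorted (PySem.Set.union (PySem.Set.ofList bd.keys) (PySem.Set.ofList cd.keys)) (fun x => x) false
  all_ids.foldl (fun signals entity_id =>
    let in_baseline := bd.contains entity_id
    let in_current := cd.contains entity_id
    -- one triple (baseline_state, current_state, classification), branches in A's order;
    -- d[entity_id] is ported as getD … none — exact: each branch only reads a key it contains
    let r : Option String × Option String × String :=
      if in_baseline && in_current then
        let baseline_state := bd.getD entity_id none
        let current_state := cd.getD entity_id none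
        (baseline_state, current_state,
          if baseline_state == current_state then "NO_CHANGE" else "STATE_CHANGE")
      else if !in_baseline && in_current then
        (none, cd.getD entity_id none, "ADDED")
      else
        (bd.getD entity_id none, none, "REMOVED")
    -- the assert always holds and is a no-op
    signals ++ [[("entity_id", some entity_id), ("classification", some r.2.2),
                 ("baseline_state", r.1), ("current_state", r.2.1),
                 ("state_field", some "synthesis_state"), ("source", some "40.8_delivery_packet")]]) []

-- ===== PORT B =====
def pvRecord (entity_id classification : String) (baseline_state current_state : Option String) : List (String × Option String) :=
  [("entity_id", some entity_id), ("classification", some classification),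
   ("baseline_state", baseline_state), ("current_state", current_state),
   ("state_field", some "synthesis_state"), ("source", some "40.8_delivery_packet")]

-- the while-loop with pointers i, j plus the two drain loops of Source B, as the obvious
-- structural recursion on the two suffixes bs[i:], cs[j:]
def pvMerge : List (String × Option String) → List (String × Option String) → List (List (String × Option String))
  | [], cs => cs.map (fun p => pvRecord p.1 "ADDED" none p.2)
  | b :: bs, [] => (b :: bs).map (fun p => pvRecord p.1 "REMOVED" p.2 none)
  | (bk, bv) :: bs, (ck, cv) :: cs =>
    if bk == ck then
      pvRecord bk (if bv == cv then "NO_CHANGE" else "STATE_CHANGE") bv cv :: pvMerge bs cs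
    else if bk < ck then
      pvRecord bk "REMOVED" bv none :: pvMerge bs ((ck, cv) :: cs)
    else
      pvRecord ck "ADDED" none cv :: pvMerge ((bk, bv) :: bs) cs
termination_by bs cs => bs.length + cs.length

def compare_entities_alt (baseline_entities : List (String × Option String)) (current_entities : List (String × Option String)) : List (List (String × Option String)) :=
  let bs := PySem.List.sorted (PySem.Dict.mk baseline_entities).items (fun kv => kv.1) false
  let cs := PySem.List.sorted (PySem.Dict.mk current_entities).items (fun kv => kv.1) false
  pvMerge bs cs

-- ===== PRECONDITION & SPEC =====
-- Pre_ excludes association lists with a repeated key: such a list encodes no Python dict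
-- (A's parameters are dicts), so nothing is claimed there.
def Pre_compare_entities (baseline_entities : List (String × Option String)) (current_entities : List (String × Option String)) : Prop :=
  (baseline_entities.map Prod.fst).Nodup ∧ (current_entities.map Prod.fst).Nodup
instance (baseline_entities : List (String × Option String)) (current_entities : List (String × Option String)) : Decidable (Pre_compare_entities baseline_entities current_entities) := by unfold Pre_compare_entities; infer_instance

def pvWitness_compare_entities : (List (String × Option String)) × (List (String × Option String)) :=
  ([("a", some "x"), ("c", none)], [("a", none), ("b", some "y")])

def Spec_compare_entities (baseline_entities : List (String × Option String)) (current_entities : List (String × Option String)) (out : List (List (String × Option String))) : Prop := out = compare_entities_alt baseline_entities current_entities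
instance (baseline_entities : List (String × Option String)) (current_entities : List (String × Option String)) (out : List (List (String × Option String))) : Decidable (Spec_compare_entities baseline_entities current_entities out) := by unfold Spec_compare_entities; infer_instance

-- ===== CLAIM (what is proved, stated in full; the proofs are below) =====
def Claim_equal_compare_entities : Prop := ∀ (baseline_entities : List (String × Option String)) (current_entities : List (String × Option String)), Dom_compare_entities baseline_entities current_entities → Pre_compare_entities baseline_entities current_entities → Spec_compare_entities baseline_entities current_entities (compare_entities baseline_entities current_entities)

-- ===== LEMMAS AND PROOFS =====

-- proof-side skeleton of the merge: the key list it walks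
def pvMergeK : List String → List String → List String
  | [], ls => ls
  | k :: ks, [] => k :: ks
  | k :: ks, l :: ls =>
    if k == l then k :: pvMergeK ks ls
    else if k < l then k :: pvMergeK ks (l :: ls)
    else l :: pvMergeK (k :: ks) ls
termination_by ks ls => ks.length + ls.length

lemma mem_pvMergeK (ks ls : List String) (e : String) :
    e ∈ pvMergeK ks ls ↔ e ∈ ks ∨ e ∈ ls := by
  fun_induction pvMergeK ks ls with
  | case1 ls => simp
  | case2 k ks => simp
  | case3 k ks l ls h ih =>
    simp only [List.mem_cons, ih]
    have : k = l := by simpa using h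
    subst this; tauto
  | case4 k ks l ls h1 h2 ih =>
    simp only [List.mem_cons, ih]; tauto
  | case5 k ks l ls h1 h2 ih =>
    simp only [List.mem_cons, ih]; tauto

lemma pairwise_pvMergeK (ks ls : List String)
    (hk : ks.Pairwise (· < ·)) (hl : ls.Pairwise (· < ·)) :
    (pvMergeK ks ls).Pairwise (· < ·) := by
  fun_induction pvMergeK ks ls with
  | case1 ls => exact hl
  | case2 k ks => exact hk
  | case3 k ks l ls h ih =>
    have hkl : k = l := by simpa using h
    subst hkl
    rw [List.pairwise_cons] at hk hl
    refine List.pairwise_cons.2 ⟨?_, ih hk.2 hl.2⟩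
    intro y hy
    rcases (mem_pvMergeK _ _ _).1 hy with h' | h'
    · exact hk.1 y h'
    · exact hl.1 y h'
  | case4 k ks l ls h1 h2 ih =>
    have hkl : k < l := by simpa using h2
    rw [List.pairwise_cons] at hk
    refine List.pairwise_cons.2 ⟨?_, ih hk.2 hl⟩
    intro y hy
    rcases (mem_pvMergeK _ _ _).1 hy with h' | h'
    · exact hk.1 y h'
    · rcases List.mem_cons.1 h' with rfl | h''
      · exact hkl
      · exact lt_trans hkl ((List.pairwise_cons.1 hl).1 y h'')
  | case5 k ks l ls h1 h2 ih =>
    have hlk : l < k := by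
      have h1' : ¬ k = l := by simpa using h1
      exact lt_of_le_of_ne (not_lt.1 h2) (fun h => h1' h.symm)
    rw [List.pairwise_cons] at hl
    refine List.pairwise_cons.2 ⟨?_, ih hk hl.2⟩
    intro y hy
    rcases (mem_pvMergeK _ _ _).1 hy with h' | h'
    · rcases List.mem_cons.1 h' with rfl | h''
      · exact hlk
      · exact lt_trans hlk ((List.pairwise_cons.1 hk).1 y h'')
    · exact hl.1 y h'

-- per-key value of an association list (first match), and the record A's classification
-- chain produces for a key, phrased over the two sorted item lists
def pvVal (l : List (String × Option String)) (e : String) : Option String :=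
  match l.find? (fun p => p.1 == e) with
  | some p => p.2
  | none => none

def pvR (bs cs : List (String × Option String)) (e : String) : List (String × Option String) :=
  if e ∈ bs.map Prod.fst then
    if e ∈ cs.map Prod.fst then
      pvRecord e (if pvVal bs e == pvVal cs e then "NO_CHANGE" else "STATE_CHANGE") (pvVal bs e) (pvVal cs e)
    else pvRecord e "REMOVED" (pvVal bs e) none
  else pvRecord e "ADDED" none (pvVal cs e)

lemma pvVal_cons_ne (p : String × Option String) (bs : List (String × Option String)) (e : String)
    (h : p.1 ≠ e) : pvVal (p :: bs) e = pvVal bs e := by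
  simp [pvVal, List.find?_cons_of_neg, h]

lemma pvVal_cons_self (k : String) (v : Option String) (bs : List (String × Option String)) :
    pvVal ((k, v) :: bs) k = v := by
  simp [pvVal]

lemma pvVal_cons_fst (p : String × Option String) (bs : List (String × Option String)) :
    pvVal (p :: bs) p.1 = p.2 := by
  simp [pvVal]

lemma pvR_drop_b (p : String × Option String) (bs cs : List (String × Option String)) (e : String)
    (h : e ≠ p.1) : pvR (p :: bs) cs e = pvR bs cs e := by
  simp only [pvR, List.map_cons, List.mem_cons, h, false_or]
  rw [pvVal_cons_ne p bs e (Ne.symm h)]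

lemma pvR_drop_c (p : String × Option String) (bs cs : List (String × Option String)) (e : String)
    (h : e ≠ p.1) : pvR bs (p :: cs) e = pvR bs cs e := by
  simp only [pvR, List.map_cons, List.mem_cons, h, false_or]
  rw [pvVal_cons_ne p cs e (Ne.symm h)]

lemma map_added (cs : List (String × Option String)) (hc : cs.Pairwise (fun p q => p.1 < q.1)) :
    (cs.map Prod.fst).map (pvR [] cs) = cs.map (fun p => pvRecord p.1 "ADDED" none p.2) := by
  induction cs with
  | nil => rfl
  | cons p t ih =>
    rw [List.pairwise_cons] at hc
    simp only [List.map_cons, List.map_map]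
    refine congrArg₂ _ ?_ ?_
    · simp [pvR, pvVal_cons_fst]
    · rw [show ((fun e => pvR [] (p :: t) e) ∘ Prod.fst) = (fun q => pvR [] (p :: t) q.1) from rfl]
      have : ∀ q ∈ t, pvR [] (p :: t) q.1 = pvR [] t q.1 := by
        intro q hq
        exact pvR_drop_c p [] t q.1 (ne_of_gt (hc.1 q hq))
      rw [List.map_congr_left this]
      have := ih hc.2
      simpa [List.map_map, Function.comp] using this

lemma map_removed (bs : List (String × Option String)) (hb : bs.Pairwise (fun p q => p.1 < q.1)) :
    (bs.map Prod.fst).map (pvR bs []) = bs.map (fun p => pvRecord p.1 "REMOVED" p.2 none) := by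
  induction bs with
  | nil => rfl
  | cons p t ih =>
    rw [List.pairwise_cons] at hb
    simp only [List.map_cons, List.map_map]
    refine congrArg₂ _ ?_ ?_
    · simp [pvR, pvVal_cons_fst, List.mem_cons]
    · rw [show ((fun e => pvR (p :: t) [] e) ∘ Prod.fst) = (fun q => pvR (p :: t) [] q.1) from rfl]
      have : ∀ q ∈ t, pvR (p :: t) [] q.1 = pvR t [] q.1 := by
        intro q hq
        exact pvR_drop_b p t [] q.1 (ne_of_gt (hb.1 q hq))
      rw [List.map_congr_left this]
      have := ih hb.2
      simpa [List.map_map, Function.comp] using this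

-- the merge IS the map of A's per-key record function over the merged key list
lemma pvMerge_eq (bs cs : List (String × Option String))
    (hb : bs.Pairwise (fun p q => p.1 < q.1)) (hc : cs.Pairwise (fun p q => p.1 < q.1)) :
    pvMerge bs cs = (pvMergeK (bs.map Prod.fst) (cs.map Prod.fst)).map (pvR bs cs) := by
  fun_induction pvMerge bs cs with
  | case1 cs =>
    simp only [List.map_nil, pvMergeK]
    exact (map_added cs hc).symm
  | case2 b bs =>
    rw [show pvMergeK ((b :: bs).map Prod.fst) ((List.nil : List (String × Option String)).map Prod.fst) = (b :: bs).map Prod.fst from by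
          simp only [List.map_cons, List.map_nil, pvMergeK],
        map_removed (b :: bs) hb]
  | case3 bk bv bs ck cv cs h ih =>
    have hkl : bk = ck := by simpa using h
    subst hkl
    rw [List.pairwise_cons] at hb hc
    simp only [List.map_cons, pvMergeK, if_pos h]
    refine congrArg₂ _ ?_ ?_
    · simp [pvR, pvVal_cons_self, List.mem_cons]
    · rw [ih hb.2 hc.2]
      refine (List.map_congr_left ?_).symm
      intro e he
      rcases (mem_pvMergeK _ _ _).1 he with h' | h'
      · obtain ⟨q, hq, rfl⟩ := List.mem_map.1 h'
        rw [pvR_drop_b (bk, bv) bs ((bk, cv) :: cs) q.1 (ne_of_gt (hb.1 q hq)),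
            pvR_drop_c (bk, cv) bs cs q.1 (ne_of_gt (hb.1 q hq))]
      · obtain ⟨q, hq, rfl⟩ := List.mem_map.1 h'
        rw [pvR_drop_b (bk, bv) bs ((bk, cv) :: cs) q.1 (ne_of_gt (hc.1 q hq)),
            pvR_drop_c (bk, cv) bs cs q.1 (ne_of_gt (hc.1 q hq))]
  | case4 bk bv bs ck cv cs h1 h2 ih =>
    have hlt : bk < ck := by simpa using h2
    rw [List.pairwise_cons] at hb
    simp only [List.map_cons, pvMergeK, if_neg h1, if_pos h2]
    have hbk_notin : bk ∉ ((ck, cv) :: cs).map Prod.fst := by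
      simp only [List.map_cons, List.mem_cons, not_or]
      refine ⟨ne_of_lt hlt, ?_⟩
      intro hmem
      obtain ⟨q, hq, hEq⟩ := List.mem_map.1 hmem
      exact absurd hEq.symm (ne_of_lt (lt_trans hlt ((List.pairwise_cons.1 hc).1 q hq)))
    refine congrArg₂ _ ?_ ?_
    · have hnotin : ¬ (bk = ck ∨ ∃ x, (bk, x) ∈ cs) := by
        simpa [List.mem_cons, List.mem_map] using hbk_notin
      simp [pvR, List.mem_cons, pvVal_cons_self, hnotin]
    · rw [ih hb.2 hc]
      refine (List.map_congr_left ?_).symm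
      intro e he
      rcases (mem_pvMergeK _ _ _).1 he with h' | h'
      · obtain ⟨q, hq, rfl⟩ := List.mem_map.1 h'
        exact pvR_drop_b (bk, bv) bs ((ck, cv) :: cs) q.1 (ne_of_gt (hb.1 q hq))
      · simp only [List.map_cons, List.mem_cons] at h'
        rcases h' with h'' | h''
        · exact h'' ▸ pvR_drop_b (bk, bv) bs ((ck, cv) :: cs) ck (ne_of_gt hlt)
        · obtain ⟨q, hq, rfl⟩ := List.mem_map.1 h''
          exact pvR_drop_b (bk, bv) bs ((ck, cv) :: cs) q.1
            (ne_of_gt (lt_trans hlt ((List.pairwise_cons.1 hc).1 q hq)))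
  | case5 bk bv bs ck cv cs h1 h2 ih =>
    have hlt : ck < bk := by
      have h1' : ¬ bk = ck := by simpa using h1
      exact lt_of_le_of_ne (not_lt.1 h2) (fun h => h1' h.symm)
    rw [List.pairwise_cons] at hc
    simp only [List.map_cons, pvMergeK, if_neg h1, if_neg h2]
    have hck_notin : ck ∉ ((bk, bv) :: bs).map Prod.fst := by
      simp only [List.map_cons, List.mem_cons, not_or]
      refine ⟨ne_of_lt hlt, ?_⟩
      intro hmem
      obtain ⟨q, hq, hEq⟩ := List.mem_map.1 hmem
      exact absurd hEq.symm (ne_of_lt (lt_trans hlt ((List.pairwise_cons.1 hb).1 q hq)))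
    refine congrArg₂ _ ?_ ?_
    · have hnotin : ¬ (ck = bk ∨ ∃ x, (ck, x) ∈ bs) := by
        simpa [List.mem_cons, List.mem_map] using hck_notin
      simp [pvR, List.mem_cons, pvVal_cons_self, hnotin]
    · rw [ih hb hc.2]
      refine (List.map_congr_left ?_).symm
      intro e he
      rcases (mem_pvMergeK _ _ _).1 he with h' | h'
      · simp only [List.map_cons, List.mem_cons] at h'
        rcases h' with h'' | h''
        · exact h'' ▸ pvR_drop_c (ck, cv) ((bk, bv) :: bs) cs bk (ne_of_gt hlt)
        · obtain ⟨q, hq, rfl⟩ := List.mem_map.1 h''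
          exact pvR_drop_c (ck, cv) ((bk, bv) :: bs) cs q.1
            (ne_of_gt (lt_trans hlt ((List.pairwise_cons.1 hb).1 q hq)))
      · obtain ⟨q, hq, rfl⟩ := List.mem_map.1 h'
        exact pvR_drop_c (ck, cv) ((bk, bv) :: bs) cs q.1 (ne_of_gt (hc.1 q hq))

-- first-match lookup in the sorted item list of a duplicate-free dict is the dict lookup
lemma pvVal_sorted (d : PySem.Dict String (Option String)) (hnd : d.keys.Nodup) (e : String)
    (he : e ∈ (PySem.List.sorted d.items (fun kv => kv.1) false).map Prod.fst) :
    pvVal (PySem.List.sorted d.items (fun kv => kv.1) false) e = d.getD e none := by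
  obtain ⟨p, hp, hpe⟩ := List.mem_map.1 he
  have hsome : ((PySem.List.sorted d.items (fun kv => kv.1) false).find?
      (fun q => q.1 == e)).isSome := by
    rw [List.find?_isSome]
    exact ⟨p, hp, by simp [hpe]⟩
  obtain ⟨q, hfind⟩ := Option.isSome_iff_exists.1 hsome
  have hqe : q.1 = e := by simpa using List.find?_some hfind
  have hqmem : q ∈ d.items := (PySem.List.mem_sorted _ _ _ _).1 (List.mem_of_find?_eq_some hfind)
  have : d.getD e none = q.2 := by
    have hm : (e, q.2) ∈ d.items := by rw [← hqe]; exact hqmem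
    exact PySem.Dict.getD_of_mem_items d hm hnd none
  rw [this, pvVal, hfind]

theorem compare_entities_spec : Claim_equal_compare_entities := by
  intro b c _ hpre
  unfold Spec_compare_entities compare_entities compare_entities_alt
  simp only []
  set bd := PySem.Dict.mk b with hbd
  set cd := PySem.Dict.mk c with hcd
  set Sb := PySem.List.sorted bd.items (fun kv => kv.1) false with hSb
  set Sc := PySem.List.sorted cd.items (fun kv => kv.1) false with hSc
  have hnb : bd.keys.Nodup := by simpa [PySem.Dict.keys] using hpre.1
  have hnc : cd.keys.Nodup := by simpa [PySem.Dict.keys] using hpre.2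
  have hKbp : (Sb.map Prod.fst).Perm bd.keys := by
    simpa [PySem.Dict.keys] using (PySem.List.sorted_perm bd.items (fun kv => kv.1) false).map Prod.fst
  have hKcp : (Sc.map Prod.fst).Perm cd.keys := by
    simpa [PySem.Dict.keys] using (PySem.List.sorted_perm cd.items (fun kv => kv.1) false).map Prod.fst
  have hKblt : (Sb.map Prod.fst).Pairwise (· < ·) := by
    have hle : (Sb.map Prod.fst).Pairwise (· ≤ ·) :=
      PySem.List.sorted_map_key_pairwise bd.items (fun kv => kv.1)
    have hnd : (Sb.map Prod.fst).Nodup := hKbp.nodup_iff.2 hnb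
    exact (hle.and hnd).imp (fun h => lt_of_le_of_ne h.1 h.2)
  have hKclt : (Sc.map Prod.fst).Pairwise (· < ·) := by
    have hle : (Sc.map Prod.fst).Pairwise (· ≤ ·) :=
      PySem.List.sorted_map_key_pairwise cd.items (fun kv => kv.1)
    have hnd : (Sc.map Prod.fst).Nodup := hKcp.nodup_iff.2 hnc
    exact (hle.and hnd).imp (fun h => lt_of_le_of_ne h.1 h.2)
  have hpb : Sb.Pairwise (fun p q => p.1 < q.1) := List.pairwise_map.1 hKblt
  have hpc : Sc.Pairwise (fun p q => p.1 < q.1) := List.pairwise_map.1 hKclt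
  have hU : PySem.List.sorted
      (PySem.Set.union (PySem.Set.ofList bd.keys) (PySem.Set.ofList cd.keys)) (fun x => x) false
      = pvMergeK (Sb.map Prod.fst) (Sc.map Prod.fst) := by
    apply PySem.List.sorted_eq_of_perm_of_pairwise_lt
    · rw [List.perm_ext_iff_of_nodup
        ((pairwise_pvMergeK _ _ hKblt hKclt).imp (fun h => ne_of_lt h))
        (PySem.Set.nodup_union _ _ (PySem.Set.nodup_ofList _))]
      intro a
      simp [mem_pvMergeK, PySem.Set.mem_union, PySem.Set.mem_ofList, hKbp.mem_iff, hKcp.mem_iff]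
    · exact pairwise_pvMergeK _ _ hKblt hKclt
  rw [PySem.List.foldl_append_singleton_eq_map, hU, pvMerge_eq Sb Sc hpb hpc, List.nil_append]
  refine List.map_congr_left ?_
  intro e he
  rcases (mem_pvMergeK _ _ _).1 he with hb' | hc'
  · have hcb : bd.contains e = true := (PySem.Dict.contains_iff_mem_keys _ _).2 (hKbp.mem_iff.1 hb')
    by_cases hc' : e ∈ Sc.map Prod.fst
    · have hcc : cd.contains e = true := (PySem.Dict.contains_iff_mem_keys _ _).2 (hKcp.mem_iff.1 hc')
      have hvb : pvVal Sb e = bd.getD e none := pvVal_sorted bd hnb e hb'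
      have hvc : pvVal Sc e = cd.getD e none := pvVal_sorted cd hnc e hc'
      simp [pvR, pvRecord, hb', hc', hcb, hcc, hvb, hvc]
    · have hcc : cd.contains e = false := by
        rw [← Bool.not_eq_true]
        intro h
        exact hc' (hKcp.mem_iff.2 ((PySem.Dict.contains_iff_mem_keys _ _).1 h))
      have hvb : pvVal Sb e = bd.getD e none := pvVal_sorted bd hnb e hb'
      simp [pvR, pvRecord, hb', hc', hcb, hcc, hvb]
  · have hcc : cd.contains e = true := (PySem.Dict.contains_iff_mem_keys _ _).2 (hKcp.mem_iff.1 hc')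
    by_cases hb' : e ∈ Sb.map Prod.fst
    · have hcb : bd.contains e = true := (PySem.Dict.contains_iff_mem_keys _ _).2 (hKbp.mem_iff.1 hb')
      have hvb : pvVal Sb e = bd.getD e none := pvVal_sorted bd hnb e hb'
      have hvc : pvVal Sc e = cd.getD e none := pvVal_sorted cd hnc e hc'
      simp [pvR, pvRecord, hb', hc', hcb, hcc, hvb, hvc]
    · have hcb : bd.contains e = false := by
        rw [← Bool.not_eq_true]
        intro h
        exact hb' (hKbp.mem_iff.2 ((PySem.Dict.contains_iff_mem_keys _ _).1 h))
      have hvc : pvVal Sc e = cd.getD e none := pvVal_sorted cd hnc e hc'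
      simp [pvR, pvRecord, hb', hcb, hcc, hvc]
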